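-- pv_equiv track=rewrite | github.com/github-gk-aks/post-migration-self-service | files/prepare-replacement-machine_user_ssh_key.py | prepare_replacements
-- ===== SOURCE A (Python) =====
-- def prepare_replacements(data):
--     replacements = {}
--
--     for entry in data:
--         repo_name, file_path, search, replace = entry
--
--         if repo_name not in replacements:
--             replacements[repo_name] = []
--
--         replacements[repo_name].append((file_path, file_path, search, replace))
--
--     return replacements
-- ===== SOURCE B (Python) =====
-- def prepare_replacements(data):
--     repos = list(dict.fromkeys(e[0] for e in data))
--     return {repo: [(fp, fp, s, r) for (rn, fp, s, r) in data if rn == repo]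
--             for repo in repos}
-- ===== Notes on version B (the rewrite author's own statement) =====
-- stated objective: alternative
-- what changed: Replaces the single-pass dict-of-lists accumulation with a two-phase strategy: first compute the distinct repo names in first-occurrence order via dict.fromkeys, then build each group with a filtering comprehension over the data.
import Mathlib
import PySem

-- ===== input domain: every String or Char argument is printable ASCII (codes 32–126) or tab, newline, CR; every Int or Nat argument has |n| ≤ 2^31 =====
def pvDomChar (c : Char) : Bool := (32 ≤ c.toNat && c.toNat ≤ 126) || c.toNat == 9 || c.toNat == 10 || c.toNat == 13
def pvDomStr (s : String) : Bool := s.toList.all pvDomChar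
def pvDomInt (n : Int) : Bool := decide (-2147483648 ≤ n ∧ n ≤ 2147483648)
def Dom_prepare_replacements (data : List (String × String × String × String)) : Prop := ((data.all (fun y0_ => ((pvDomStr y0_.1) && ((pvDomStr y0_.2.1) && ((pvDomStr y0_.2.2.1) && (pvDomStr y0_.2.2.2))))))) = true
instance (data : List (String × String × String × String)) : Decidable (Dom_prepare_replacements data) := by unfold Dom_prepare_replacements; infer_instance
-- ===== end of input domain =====

-- B replaces A's single-pass dict-of-lists accumulation with a two-phase strategy
-- (ordered-dedup of repo names, then one filtering pass per name); objective: alternative.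


-- ===== PORT A =====
-- A: one pass; for each entry, create the key with an empty list if absent, then append.
def prepare_replacements (data : List (String × String × String × String)) : List (String × List (String × String × String × String)) :=
  (data.foldl
    (fun repl e =>
      let repl' := if repl.contains e.1 then repl else repl.insert e.1 []
      repl'.modify e.1 [] (fun l => l ++ [(e.2.1, e.2.1, e.2.2.1, e.2.2.2)]))
    (PySem.Dict.empty : PySem.Dict String (List (String × String × String × String)))).items

-- ===== PORT B =====
-- B: distinct repo names in first-occurrence order (dict.fromkeys = PySem.List.dedup),
-- then a filtering comprehension over data for each name.
def prepare_replacements_alt (data : List (String × String × String × String)) : List (String × List (String × String × String × String)) :=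
  (PySem.List.dedup (data.map (·.1))).map
    (fun repo =>
      (repo, (data.filter (fun e => e.1 == repo)).map (fun e => (e.2.1, e.2.1, e.2.2.1, e.2.2.2))))

-- ===== PRECONDITION & SPEC =====
def Spec_prepare_replacements (data : List (String × String × String × String)) (out : List (String × List (String × String × String × String))) : Prop := out = prepare_replacements_alt data
instance (data : List (String × String × String × String)) (out : List (String × List (String × String × String × String))) : Decidable (Spec_prepare_replacements data out) := by unfold Spec_prepare_replacements; infer_instance

-- ===== CLAIM (what is proved, stated in full; the proofs are below) =====
def Claim_equal_prepare_replacements : Prop := ∀ (data : List (String × String × String × String)), Dom_prepare_replacements data → Spec_prepare_replacements data (prepare_replacements data)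

-- ===== LEMMAS AND PROOFS =====

-- A's conditional "insert [] then append" equals a plain modify-with-default-[]:
-- inserting [] at an absent key and then modifying it is the same as modifying with default [].
theorem pv_insert_modify {ν : Type} (d : PySem.Dict String ν) (k : String) (v0 : ν) (f : ν → ν)
    (hk : ∀ p ∈ d.items, p.1 ≠ k) :
    (d.insert k v0).modify k v0 f = d.modify k v0 f := by
  have hany : (d.items.any fun p => p.1 == k) = false := by
    simp only [List.any_eq_false]
    intro p hp; simpa using hk p hp
  have hfind : List.find? (fun p => p.1 == k) d.items = none := by
    simp only [List.find?_eq_none]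
    intro p hp; simpa using hk p hp
  have hmap : List.map (fun p => if p.1 = k then (k, f v0) else p) d.items = d.items :=
    (List.map_congr_left (fun p hp => by simp [hk p hp])).trans (List.map_id _)
  simp [PySem.Dict.modify, PySem.Dict.insert, PySem.Dict.getD, PySem.Dict.get?, PySem.Dict.contains,
        hany, hfind, List.find?_append, hmap]

-- every step of A's loop is a plain modify (contains or not)
theorem pv_step_eq (d : PySem.Dict String (List (String × String × String × String)))
    (e : String × String × String × String) :
    (let d' := if d.contains e.1 then d else d.insert e.1 []
     d'.modify e.1 [] (fun l => l ++ [(e.2.1, e.2.1, e.2.2.1, e.2.2.2)])) =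
    d.modify e.1 [] (fun l => l ++ [(e.2.1, e.2.1, e.2.2.1, e.2.2.2)]) := by
  by_cases h : d.contains e.1 = true
  · simp [h]
  · have hb : d.contains e.1 = false := by simpa using h
    have hk : ∀ p ∈ d.items, p.1 ≠ e.1 := by
      intro p hp hpk
      have hmem : e.1 ∈ d.keys := hpk ▸ PySem.Dict.mem_keys_of_mem_items d hp
      have := (PySem.Dict.contains_iff_mem_keys d e.1).mpr hmem
      simp [this] at hb
    simp only [hb, Bool.false_eq_true, if_false]
    exact pv_insert_modify d e.1 [] _ hk

-- ===== VERDICT (by name: the statement is the Claim_ definition above) =====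
theorem prepare_replacements_spec : Claim_equal_prepare_replacements := by
  intro data _
  unfold Spec_prepare_replacements prepare_replacements prepare_replacements_alt
  -- replace A's step by the plain modify step
  have hfold :
      data.foldl
        (fun repl e =>
          let repl' := if repl.contains e.1 then repl else repl.insert e.1 []
          repl'.modify e.1 [] (fun l => l ++ [(e.2.1, e.2.1, e.2.2.1, e.2.2.2)]))
        (PySem.Dict.empty : PySem.Dict String (List (String × String × String × String))) =
      ((data.map (fun e => (e.1, (e.2.1, e.2.1, e.2.2.1, e.2.2.2)))).foldl
        (fun d p => d.modify p.1 [] (fun l => l ++ [p.2]))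
        PySem.Dict.empty) := by
    rw [List.foldl_map]
    exact congrFun (congrFun (congrArg _ (funext fun d => funext fun e => pv_step_eq d e)) _) _
  rw [hfold]
  set l := data.map (fun e => (e.1, (e.2.1, e.2.1, e.2.2.1, e.2.2.2))) with hl
  set D := l.foldl (fun d p => d.modify p.1 [] (fun ll => ll ++ [p.2])) PySem.Dict.empty with hD
  have hnd : D.keys.Nodup := by
    rw [hD]
    exact PySem.Dict.nodup_keys_foldl_modify_key l (·.1) [] _ _ PySem.Dict.nodup_keys_empty
  have hkeys : D.keys = PySem.List.dedup (data.map (·.1)) := by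
    rw [hD, PySem.Dict.keys_foldl_modify_key, PySem.Dict.keys_empty, PySem.Set.update_nil_left,
        PySem.List.dedup_eq_ofList, hl, List.map_map]
    simp [Function.comp_def]
  have hget : ∀ c, D.getD c [] =
      (data.filter (fun e => e.1 == c)).map (fun e => (e.2.1, e.2.1, e.2.2.1, e.2.2.2)) := by
    intro c
    rw [hD, PySem.Dict.getD_foldl_modify_append, PySem.Dict.getD_empty, hl, List.filter_map,
        List.map_map]
    simp [Function.comp_def]
  rw [PySem.Dict.items_eq_map_keys D hnd [], hkeys]
  exact List.map_congr_left (fun c _ => by rw [hget c])
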